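-- pv_equiv track=rewrite | github.com/Podobnykh-Aleksandr/py_dev_test1 | main.py | unique_dictionary_values
-- ===== SOURCE A (Python) =====
-- def unique_dictionary_values(ids: dict) -> list:
--     unique_values = set()
--     for lists in ids.values():
--         for values in lists:
--             unique_values.add(values)
--     unique_values = list(unique_values)
--     unique_values.sort()
--     return unique_values
-- ===== SOURCE B (Python) =====
-- def unique_dictionary_values(ids: dict) -> list:
--     flat = []
--     for lst in ids.values():
--         flat += lst
--     flat.sort()
--     result = []
--     for x in flat:
--         if not result or result[-1] != x:
--             result.append(x)
--     return result
-- ===== Notes on version B (the rewrite author's own statement) =====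
-- stated objective: alternative
-- what changed: Replaces the hash-set accumulation with flatten, in-place sort, then a single adjacent-duplicate scan that builds the deduplicated sorted output without any set.
import Mathlib
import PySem

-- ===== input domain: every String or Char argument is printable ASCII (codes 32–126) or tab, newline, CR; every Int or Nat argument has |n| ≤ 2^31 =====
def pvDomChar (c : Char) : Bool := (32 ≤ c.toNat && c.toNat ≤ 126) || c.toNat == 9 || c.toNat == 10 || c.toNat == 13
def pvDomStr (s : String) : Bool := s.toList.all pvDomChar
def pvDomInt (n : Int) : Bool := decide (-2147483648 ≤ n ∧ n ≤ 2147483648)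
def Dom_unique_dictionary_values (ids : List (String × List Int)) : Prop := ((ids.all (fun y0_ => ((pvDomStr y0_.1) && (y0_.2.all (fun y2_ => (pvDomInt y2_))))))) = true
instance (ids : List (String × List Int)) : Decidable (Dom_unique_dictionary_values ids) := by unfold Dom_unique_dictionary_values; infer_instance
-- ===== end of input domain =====

-- B replaces A's hash-set accumulation by flatten + in-place sort + one adjacent-duplicate scan (no set); an alternative algorithm of the same cost.


-- ===== PORT A =====
-- unique_values = set(); for lists in ids.values(): for values in lists: unique_values.add(values);
-- unique_values = list(unique_values); unique_values.sort() — the set is consumed only through a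
-- key-less sort, so Python's unspecified hash iteration order cannot affect the result.
def unique_dictionary_values (ids : List (String × List Int)) : List Int :=
  let unique_values : PySem.Set Int :=
    ids.foldl (fun s p => p.2.foldl (fun s v => PySem.Set.add s v) s) PySem.Set.empty
  PySem.List.sorted unique_values (fun x => x) false

-- ===== PORT B =====
-- flat = []; for lst in ids.values(): flat += lst;  flat.sort();
-- result = []; for x in flat: if not result or result[-1] != x: result.append(x);  return result
def unique_dictionary_values_alt (ids : List (String × List Int)) : List Int :=
  let flat : List Int := ids.foldl (fun acc p => acc ++ p.2) []
  let srt : List Int := PySem.List.sorted flat (fun x => x) false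
  srt.foldl (fun res x =>
    if res = [] ∨ PySem.List.pyGet? res (-1) ≠ some x then res ++ [x] else res) []

-- ===== PRECONDITION & SPEC =====
def Spec_unique_dictionary_values (ids : List (String × List Int)) (out : List Int) : Prop := out = unique_dictionary_values_alt ids
instance (ids : List (String × List Int)) (out : List Int) : Decidable (Spec_unique_dictionary_values ids out) := by unfold Spec_unique_dictionary_values; infer_instance

-- ===== CLAIM (what is proved, stated in full; the proofs are below) =====
def Claim_equal_unique_dictionary_values : Prop := ∀ (ids : List (String × List Int)), Dom_unique_dictionary_values ids → Spec_unique_dictionary_values ids (unique_dictionary_values ids)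

-- ===== LEMMAS AND PROOFS =====

-- A's nested fold of set-adds equals the fold of adds over the flattened value lists.
lemma foldA_eq_flat (ids : List (String × List Int)) (s : PySem.Set Int) :
    ids.foldl (fun s p => p.2.foldl (fun s v => PySem.Set.add s v) s) s
      = (ids.flatMap (fun p => p.2)).foldl (fun s v => PySem.Set.add s v) s := by
  induction ids generalizing s with
  | nil => rfl
  | cons p t ih => simp [List.foldl_append, ih]

-- in a strictly increasing list every element is ≤ the last one
lemma le_of_mem_getLast? (l : List Int) (a m : Int)
    (hp : l.Pairwise (· < ·)) (ha : a ∈ l) (hm : l.getLast? = some m) : a ≤ m := by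
  obtain ⟨l', rfl⟩ := List.getLast?_eq_some_iff.mp hm
  rcases List.mem_append.mp ha with h | h
  · exact le_of_lt ((List.pairwise_append.mp hp).2.2 a h m (by simp))
  · simp at h; omega

-- invariant of B's adjacent-duplicate scan over a ≤-sorted list: the accumulated result
-- stays strictly increasing and holds exactly the elements seen so far
lemma scan_spec (s : List Int) : ∀ (acc : List Int), acc.Pairwise (· < ·) →
    (∀ a ∈ acc, ∀ x ∈ s, a ≤ x) → s.Pairwise (· ≤ ·) →
    (s.foldl (fun res x => if res = [] ∨ PySem.List.pyGet? res (-1) ≠ some x then res ++ [x] else res) acc).Pairwise (· < ·) ∧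
    ∀ y, (y ∈ s.foldl (fun res x => if res = [] ∨ PySem.List.pyGet? res (-1) ≠ some x then res ++ [x] else res) acc ↔ y ∈ acc ∨ y ∈ s) := by
  induction s with
  | nil => intro acc hlt _ _; exact ⟨hlt, fun y => by simp⟩
  | cons x t ih =>
    intro acc hlt hle hs
    rw [List.foldl_cons]
    have hst : t.Pairwise (· ≤ ·) := (List.pairwise_cons.mp hs).2
    have hxt : ∀ y ∈ t, x ≤ y := (List.pairwise_cons.mp hs).1
    by_cases hc : acc = [] ∨ PySem.List.pyGet? acc (-1) ≠ some x
    · rw [if_pos hc]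
      have hax : ∀ a ∈ acc, a < x := by
        intro a ha
        have hne : acc ≠ [] := List.ne_nil_of_mem ha
        obtain ⟨m, hm⟩ := Option.isSome_iff_exists.mp (List.getLast?_isSome.mpr hne)
        have hmx : m ≠ x := by
          rcases hc with h | h
          · exact absurd h hne
          · rw [PySem.List.pyGet?_neg_one, hm] at h; simpa using h
        have h1 : a ≤ m := le_of_mem_getLast? acc a m hlt ha hm
        have h2 : m ≤ x := hle m (List.mem_of_getLast? hm) x (by simp)
        omega
      have hlt' : (acc ++ [x]).Pairwise (· < ·) := by
        rw [List.pairwise_append]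
        exact ⟨hlt, by simp, by simpa using hax⟩
      have hle' : ∀ a ∈ acc ++ [x], ∀ y ∈ t, a ≤ y := by
        intro a ha y hy
        rcases List.mem_append.mp ha with h | h
        · exact hle a h y (by simp [hy])
        · simp at h; subst h; exact hxt y hy
      obtain ⟨p1, p2⟩ := ih (acc ++ [x]) hlt' hle' hst
      refine ⟨p1, fun y => ?_⟩
      rw [p2 y]; simp; tauto
    · rw [if_neg hc]
      rw [not_or, not_ne_iff] at hc
      have hxacc : x ∈ acc := by
        have := hc.2
        rw [PySem.List.pyGet?_neg_one] at this
        exact List.mem_of_getLast? this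
      have hle' : ∀ a ∈ acc, ∀ y ∈ t, a ≤ y := fun a ha y hy => hle a ha y (by simp [hy])
      obtain ⟨p1, p2⟩ := ih acc hlt hle' hst
      refine ⟨p1, fun y => ?_⟩
      rw [p2 y]
      constructor
      · tauto
      · intro h
        rcases h with h | h
        · exact Or.inl h
        · rcases List.mem_cons.mp h with rfl | h
          · exact Or.inl hxacc
          · exact Or.inr h

-- ===== VERDICT (by name: the statement is the Claim_ definition above) =====
theorem unique_dictionary_values_spec : Claim_equal_unique_dictionary_values := by
  intro ids _
  unfold Spec_unique_dictionary_values unique_dictionary_values unique_dictionary_values_alt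
  simp only [PySem.List.foldl_append_eq_flatMap, List.nil_append]
  set flat : List Int := ids.flatMap (fun p => p.2) with hflat
  have hA : ids.foldl (fun s p => p.2.foldl (fun s v => PySem.Set.add s v) s) PySem.Set.empty
      = PySem.Set.ofList flat := by
    rw [foldA_eq_flat, PySem.Set.ofList_eq_foldl]; rfl
  rw [hA]
  obtain ⟨p1, p2⟩ := scan_spec (PySem.List.sorted flat (fun x => x) false) []
    (by simp) (by simp) (PySem.List.sorted_pairwise flat (fun x => x))
  have hperm : (List.foldl (fun res x => if res = [] ∨ PySem.List.pyGet? res (-1) ≠ some x then res ++ [x] else res) []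
      (PySem.List.sorted flat (fun x => x) false)).Perm (PySem.Set.ofList flat) := by
    refine (List.perm_ext_iff_of_nodup (List.Pairwise.imp (fun h => ne_of_lt h) p1)
      (PySem.Set.nodup_ofList flat)).mpr (fun y => ?_)
    rw [p2 y, PySem.Set.mem_ofList, PySem.List.mem_sorted]
    simp
  exact PySem.List.sorted_eq_of_perm_of_pairwise_lt _ _ (fun x => x) hperm p1
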